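-- pv_equiv track=rewrite | github.com/pypi-data/pypi-mirror-404 | packages/pytransportnswv2/pytransportnswv2-2.2.2.tar.gz/pytransportnswv2-2.2.2/TransportNSWv2/TransportNSWv2.py | _get_excluded_means
-- ===== SOURCE A (Python) =====
-- def _get_excluded_means(transport_type):
--     # Create an 'excluded transport type' string based on what's INCLUDED in the transport_type list
--     if transport_type == [0]:
--         return ""
--
--     exclMOT = {
--         "exclMOT_1":  1,
--         "exclMOT_2":  1,
--         "exclMOT_4":  1,
--         "exclMOT_5":  1,
--         "exclMOT_7":  1,
--         "exclMOT_9":  1,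
--         "exclMOT_11": 1
--     }
--
--     try:
--         for tt in transport_type:
--             exclMOT[f"exclMOT_{tt}"] = 0
--
--     finally:
--         exclMOTstring = "&".join(f"{key}={value}" for key, value in exclMOT.items() if value == 1)
--
--     return f"&excludedMeans=checkbox&{exclMOTstring}"
-- ===== SOURCE B (Python) =====
-- def _get_excluded_means(transport_type):
--     if transport_type == [0]:
--         return ""
--     def keep(modes):
--         # recursive descent over the fixed mode list; direct membership test on the input
--         if not modes:
--             return []
--         head = [] if modes[0] in transport_type else [f"exclMOT_{modes[0]}=1"]
--         return head + keep(modes[1:])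
--     return "&excludedMeans=checkbox&" + "&".join(keep([1, 2, 4, 5, 7, 9, 11]))
-- ===== Notes on version B (the rewrite author's own statement) =====
-- stated objective: alternative
-- what changed: Replaces A's flag-dict (mutated by one pass over the input with a formatted string key per element, then filtered and joined) with a recursive descent over the constant 7-mode list that tests each mode by direct int membership in the input list, with no dict, no set and no string-key formatting per input element.
import Mathlib
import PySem

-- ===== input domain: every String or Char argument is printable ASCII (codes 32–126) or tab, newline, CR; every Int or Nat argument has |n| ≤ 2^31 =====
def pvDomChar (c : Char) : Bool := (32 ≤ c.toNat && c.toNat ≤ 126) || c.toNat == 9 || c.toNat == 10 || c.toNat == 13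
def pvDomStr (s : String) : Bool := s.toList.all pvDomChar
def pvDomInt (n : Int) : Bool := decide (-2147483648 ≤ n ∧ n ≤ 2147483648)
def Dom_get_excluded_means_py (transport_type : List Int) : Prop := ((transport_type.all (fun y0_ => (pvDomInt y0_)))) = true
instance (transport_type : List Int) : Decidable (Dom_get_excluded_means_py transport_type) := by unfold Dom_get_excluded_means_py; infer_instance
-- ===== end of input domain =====

-- B replaces A's flag-dict pass over the input with a recursive descent over the constant mode
-- list testing direct int membership in the input; objective: alternative decomposition.

-- ===== PORT A =====
-- f"exclMOT_{tt}"
def pvKey (tt : Int) : String := "exclMOT_" ++ PySem.Int.toStr tt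

def get_excluded_means_py (transport_type : List Int) : String :=
  if transport_type == [0] then "" else
  let exclMOT : PySem.Dict String Int := PySem.Dict.ofList
    [("exclMOT_1", 1), ("exclMOT_2", 1), ("exclMOT_4", 1), ("exclMOT_5", 1),
     ("exclMOT_7", 1), ("exclMOT_9", 1), ("exclMOT_11", 1)]
  let exclMOT := transport_type.foldl (fun d tt => d.insert (pvKey tt) 0) exclMOT
  let exclMOTstring := PySem.Str.join "&"
    ((exclMOT.items.filter (fun p => p.2 == 1)).map (fun p => p.1 ++ "=" ++ PySem.Int.toStr p.2))
  "&excludedMeans=checkbox&" ++ exclMOTstring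

-- ===== PORT B =====
-- the recursive helper 'keep' of Source B: head ++ keep rest over the fixed mode list
def pvKeep (transport_type : List Int) : List Int → List String
  | [] => []
  | m :: ms =>
      (if transport_type.contains m then [] else [pvKey m ++ "=1"]) ++ pvKeep transport_type ms

def get_excluded_means_py_alt (transport_type : List Int) : String :=
  if transport_type == [0] then "" else
  "&excludedMeans=checkbox&" ++
    PySem.Str.join "&" (pvKeep transport_type [1, 2, 4, 5, 7, 9, 11])

-- ===== PRECONDITION & SPEC =====
def Spec_get_excluded_means_py (transport_type : List Int) (out : String) : Prop := out = get_excluded_means_py_alt transport_type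
instance (transport_type : List Int) (out : String) : Decidable (Spec_get_excluded_means_py transport_type out) := by unfold Spec_get_excluded_means_py; infer_instance

-- ===== CLAIM (what is proved, stated in full; the proofs are below) =====
def Claim_equal_get_excluded_means_py : Prop := ∀ (transport_type : List Int), Dom_get_excluded_means_py transport_type → Spec_get_excluded_means_py transport_type (get_excluded_means_py transport_type)

-- ===== LEMMAS AND PROOFS =====

-- canonical decimal representation: what Nat.toDigits 10 produces
def pvRep (n : Nat) : List Char :=
  if n = 0 then ['0'] else ((Nat.digits 10 n).map Nat.digitChar).reverse

theorem pv_toDigitsCore_eq (f : Nat) : ∀ (n : Nat) (acc : List Char), n ≠ 0 → n < f →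
    Nat.toDigitsCore 10 f n acc = ((Nat.digits 10 n).map Nat.digitChar).reverse ++ acc := by
  induction f with
  | zero => intro n acc _ h; omega
  | succ f ih =>
    intro n acc hn hf
    rw [Nat.toDigitsCore]
    by_cases h10 : n / 10 = 0
    · have hlt : n < 10 := by omega
      rw [Nat.digits_def' (by norm_num) (Nat.pos_of_ne_zero hn), h10]
      simp [Nat.mod_eq_of_lt hlt]
    · rw [if_neg h10, ih (n / 10) _ h10 (by omega),
        Nat.digits_def' (by norm_num) (Nat.pos_of_ne_zero hn)]
      simp

theorem pv_toDigits_eq (n : Nat) : Nat.toDigits 10 n = pvRep n := by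
  by_cases hn : n = 0
  · subst hn; rfl
  · rw [Nat.toDigits, pv_toDigitsCore_eq (n + 1) n [] hn (by omega), pvRep, if_neg hn,
      List.append_nil]

theorem pv_digitChar_inj : ∀ d < 10, ∀ e < 10, Nat.digitChar d = Nat.digitChar e → d = e := by
  decide

theorem pv_map_digitChar_inj : ∀ (l1 l2 : List Nat), (∀ d ∈ l1, d < 10) → (∀ d ∈ l2, d < 10) →
    l1.map Nat.digitChar = l2.map Nat.digitChar → l1 = l2 := by
  intro l1
  induction l1 with
  | nil => intro l2 _ _ h; cases l2 <;> simp_all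
  | cons a l1 ih =>
    intro l2 h1 h2 h
    cases l2 with
    | nil => simp at h
    | cons b l2 =>
      simp only [List.map_cons, List.cons.injEq] at h
      have ha := pv_digitChar_inj a (h1 a (by simp)) b (h2 b (by simp)) h.1
      have := ih l2 (fun d hd => h1 d (by simp [hd])) (fun d hd => h2 d (by simp [hd])) h.2
      simp [ha, this]

theorem pv_rep_digit {n : Nat} {c : Char} (hc : c ∈ pvRep n) : '0' ≤ c ∧ c ≤ '9' := by
  rw [pvRep] at hc
  split_ifs at hc with hn
  · simp at hc; subst hc; decide
  · rw [List.mem_reverse, List.mem_map] at hc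
    obtain ⟨d, hd, rfl⟩ := hc
    have h10 : d < 10 := Nat.digits_lt_base (by norm_num) hd
    have : ∀ d < 10, '0' ≤ Nat.digitChar d ∧ Nat.digitChar d ≤ '9' := by decide
    exact this d h10

theorem pv_rep_inj : ∀ (m n : Nat), pvRep m = pvRep n → m = n := by
  have key : ∀ n : Nat, n ≠ 0 → pvRep n ≠ ['0'] := by
    intro n hn h
    rw [pvRep, if_neg hn] at h
    have h' : (Nat.digits 10 n).map Nat.digitChar = ['0'] := by
      have := congrArg List.reverse h; simpa using this
    have hd : Nat.digits 10 n = [0] := by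
      apply pv_map_digitChar_inj _ [0] (fun d hd => Nat.digits_lt_base (by norm_num) hd)
        (by simp) h'
    have := Nat.ofDigits_digits 10 n
    rw [hd] at this
    simp [Nat.ofDigits] at this
    omega
  intro m n h
  by_cases hm : m = 0 <;> by_cases hn : n = 0
  · omega
  · exfalso; exact key n hn (by rw [← h, pvRep, if_pos hm])
  · exfalso; exact key m hm (by rw [h, pvRep, if_pos hn])
  · rw [pvRep, if_neg hm, pvRep, if_neg hn] at h
    have h' := congrArg List.reverse h
    simp only [List.reverse_reverse] at h'
    have := pv_map_digitChar_inj _ _ (fun d hd => Nat.digits_lt_base (by norm_num) hd)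
      (fun d hd => Nat.digits_lt_base (by norm_num) hd) h'
    exact Nat.digits_inj_iff.mp this

theorem pv_toChars_inj (a b : Int) (h : PySem.Int.toChars a = PySem.Int.toChars b) : a = b := by
  have hhead : ∀ n : Nat, ∀ l, Nat.toDigits 10 n ≠ '-' :: l := by
    intro n l hl
    have : '-' ∈ pvRep n := by rw [← pv_toDigits_eq, hl]; simp
    have := pv_rep_digit this
    revert this; decide
  rw [PySem.Int.toChars, PySem.Int.toChars] at h
  split_ifs at h with ha hb hb
  · have h' : Nat.toDigits 10 a.natAbs = Nat.toDigits 10 b.natAbs := by simpa using h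
    have := pv_rep_inj a.natAbs b.natAbs (by rw [← pv_toDigits_eq, ← pv_toDigits_eq]; exact h')
    omega
  · exact absurd h.symm (hhead _ _)
  · exact absurd h (hhead _ _)
  · have := pv_rep_inj a.toNat b.toNat (by rw [← pv_toDigits_eq, ← pv_toDigits_eq]; exact h)
    omega

theorem pv_key_inj (a b : Int) (h : pvKey a = pvKey b) : a = b := by
  apply pv_toChars_inj
  have := congrArg String.toList h
  rw [pvKey, pvKey] at this
  simp only [String.toList_append, PySem.Int.toList_toStr] at this
  exact List.append_cancel_left this

-- membership of a formatted key among the input's formatted keys is int membership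
theorem pv_contains_key (ts : List Int) (m : Int) :
    (ts.map (fun tt => pvKey tt)).contains (pvKey m) = ts.contains m := by
  by_cases h : ts.contains m = true
  · rw [h, List.contains_iff_mem.mpr]
    rw [List.contains_iff_mem] at h
    exact List.mem_map_of_mem h
  · rw [Bool.eq_false_iff.mpr h, Bool.eq_false_iff]
    intro hc
    apply h
    rw [List.contains_iff_mem] at hc ⊢
    obtain ⟨tt, htt, he⟩ := List.mem_map.mp hc
    rwa [pv_key_inj tt m he] at htt

-- filtering+formatting A's surviving preset items over a mode list IS B's recursive keep
theorem pv_keep_eq (ts : List Int) (ms : List Int) :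
    (((ms.map (fun m => (pvKey m, (1:Int)))).filter
        (fun p => p.2 == 1 && !((ts.map (fun tt => pvKey tt)).contains p.1))).map
      (fun p => p.1 ++ "=" ++ PySem.Int.toStr p.2)) = pvKeep ts ms := by
  induction ms with
  | nil => rfl
  | cons m ms ih =>
    simp only [List.map_cons, List.filter_cons]
    cases hc : ts.contains m
    · simp only [pv_contains_key, hc, Bool.not_false, beq_self_eq_true, Bool.true_and,
        if_true, List.map_cons, ih, pvKeep, Bool.false_eq_true, if_false,
        List.singleton_append, List.cons.injEq, and_true]
      rw [String.append_assoc, show ("=" ++ PySem.Int.toStr 1 : String) = "=1" from by decide]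
    · simp only [pv_contains_key, hc, Bool.not_true, Bool.and_false, Bool.false_eq_true,
        if_false, ih, pvKeep, if_true, List.nil_append]

-- the value-1 items surviving A's insert loop are the initial items whose key the loop never wrote
theorem pv_filter_foldl (ts : List Int) (d : PySem.Dict String Int) :
    ((ts.foldl (fun d tt => d.insert (pvKey tt) 0) d).items.filter (fun p => p.2 == 1))
      = d.items.filter (fun p => p.2 == 1 && !((ts.map (fun tt => pvKey tt)).contains p.1)) := by
  induction ts generalizing d with
  | nil => simp
  | cons t ts ih =>
    rw [List.foldl_cons, ih]
    by_cases hc : d.contains (pvKey t) = true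
    · rw [PySem.Dict.items_insert, if_pos hc, List.filter_map,
        List.filter_congr (l := d.items)
          (q := fun p => p.2 == 1 && !(((t :: ts).map (fun tt => pvKey tt)).contains p.1)) ?_,
        List.map_congr_left (g := id) ?_, List.map_id]
      · intro p hp
        simp only [List.mem_filter, List.map_cons, List.contains_cons] at hp
        have hk : ¬ (p.1 == pvKey t) = true := by
          intro h
          rcases hp with ⟨-, hp2⟩
          simp [beq_iff_eq.mp h] at hp2
        rw [if_neg hk]; rfl
      · intro p hp
        simp only [Function.comp]
        by_cases hk : (p.1 == pvKey t) = true
        · simp only [hk, List.map_cons, List.contains_cons]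
          simp [beq_iff_eq.mp hk]
        · have hne : ¬ p.1 = pvKey t := by simpa using hk
          rw [if_neg hk]
          simp [hne]
    · rw [PySem.Dict.items_insert, if_neg hc, List.filter_append]
      have h2 : ([(pvKey t, (0:Int))].filter
          (fun p => p.2 == 1 && !((ts.map (fun tt => pvKey tt)).contains p.1))) = [] := by
        simp
      rw [h2, List.append_nil]
      apply List.filter_congr
      intro p hp
      have hk : (pvKey t == p.1) = false := by
        rw [beq_eq_false_iff_ne]
        intro hk
        apply hc
        simp [PySem.Dict.contains_eq_decide_mem_keys]
        rw [hk]
        exact PySem.Dict.mem_keys_of_mem_items _ hp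
      have hne : ¬ p.1 = pvKey t := by
        rw [beq_eq_false_iff_ne] at hk; exact fun h => hk h.symm
      simp [hne]

-- ===== VERDICT (by name: the statement is the Claim_ definition above) =====
set_option maxHeartbeats 1000000 in
theorem get_excluded_means_py_spec : Claim_equal_get_excluded_means_py := by
  intro ts _
  show get_excluded_means_py ts = get_excluded_means_py_alt ts
  unfold get_excluded_means_py get_excluded_means_py_alt
  by_cases h0 : ts == [0]
  · simp [h0]
  · simp only [h0, Bool.false_eq_true, if_false]
    rw [pv_filter_foldl]
    have hd : (PySem.Dict.ofList
      [("exclMOT_1", (1:Int)), ("exclMOT_2", 1), ("exclMOT_4", 1), ("exclMOT_5", 1),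
       ("exclMOT_7", 1), ("exclMOT_9", 1), ("exclMOT_11", 1)] : PySem.Dict String Int).items =
      ([1, 2, 4, 5, 7, 9, 11] : List Int).map (fun m => (pvKey m, (1:Int))) := by decide
    rw [hd, pv_keep_eq]
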